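-- pv_equiv track=rewrite | github.com/OctaviaOZ/capstone-google-data-analytics | data-downloader/divvy-data-downloader.py | filter_files_by_quarter
-- ===== SOURCE A (Python) =====
-- def filter_files_by_quarter(files, year, quarter):
--     """
--     Filter files list to include only those from the specified year and quarter.
--
--     Args:
--         files: List of file dictionaries
--         year: Year to filter by (as integer)
--         quarter: Quarter to filter by (1-4)
--
--     Returns:
--         Filtered list of files
--     """
--     if not year or not quarter:
--         return files
--
--     if quarter not in [1, 2, 3, 4]:
--         raise ValueError("Quarter must be 1, 2, 3, or 4")
--
--     # Define month ranges for each quarter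
--     quarter_months = {
--         1: [1, 2, 3],
--         2: [4, 5, 6],
--         3: [7, 8, 9],
--         4: [10, 11, 12]
--     }
--
--     return [
--         file for file in files
--         if file["year"] == year and file["month"] in quarter_months[quarter]
--     ]
-- ===== SOURCE B (Python) =====
-- def filter_files_by_quarter(files, year, quarter):
--     """
--     Filter files list to include only those from the specified year and quarter.
--     Groups the matching-year files into quarter buckets in one pass, then
--     returns the requested bucket (instead of filtering with a predicate).
--     """
--     if not year or not quarter:
--         return files
--
--     if quarter not in (1, 2, 3, 4):
--         raise ValueError("Quarter must be 1, 2, 3, or 4")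
--
--     groups = {}
--     for file in files:
--         if file["year"] == year:
--             groups.setdefault((file["month"] - 1) // 3 + 1, []).append(file)
--     return groups.get(quarter, [])
-- ===== Notes on version B (the rewrite author's own statement) =====
-- stated objective: alternative
-- what changed: Instead of filtering with a predicate over a precomputed month-list table, B makes one grouping pass that buckets the matching-year files into a dict keyed by computed quarter ((month-1)//3+1) and returns the requested bucket.
import Mathlib
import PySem

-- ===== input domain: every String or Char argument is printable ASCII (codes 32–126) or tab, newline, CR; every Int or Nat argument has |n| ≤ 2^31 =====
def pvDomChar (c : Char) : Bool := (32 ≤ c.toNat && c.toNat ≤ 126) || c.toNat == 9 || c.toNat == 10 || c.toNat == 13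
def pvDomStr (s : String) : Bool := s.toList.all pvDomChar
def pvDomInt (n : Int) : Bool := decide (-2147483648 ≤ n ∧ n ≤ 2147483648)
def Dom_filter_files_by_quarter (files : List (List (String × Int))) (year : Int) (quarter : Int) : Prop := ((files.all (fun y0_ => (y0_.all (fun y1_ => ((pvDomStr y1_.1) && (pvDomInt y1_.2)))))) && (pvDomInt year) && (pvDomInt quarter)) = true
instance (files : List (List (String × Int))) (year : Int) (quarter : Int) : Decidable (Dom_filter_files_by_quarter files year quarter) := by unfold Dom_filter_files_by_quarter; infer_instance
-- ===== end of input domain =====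

-- B builds a dict of quarter buckets from the matching-year files in one pass and returns the requested bucket, instead of A's predicate filter over a month-list table (objective: alternative).


-- ===== PORT A =====
-- file["k"]: first-match lookup; a missing key is a KeyError in Python, excluded by Pre_ (default 0 is never reached inside Pre_)
def pyGetKey (f : List (String × Int)) (k : String) : Int :=
  match f with
  | [] => 0
  | (k', v) :: rest => if k' == k then v else pyGetKey rest k

def filter_files_by_quarter (files : List (List (String × Int))) (year : Int) (quarter : Int) : List (List (String × Int)) :=
  if year == 0 || quarter == 0 then files
  else if !(([1, 2, 3, 4] : List Int).contains quarter) then []  -- raise ValueError: excluded by Pre_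
  else
    let quarter_months : PySem.Dict Int (List Int) :=
      ((((PySem.Dict.empty).insert 1 [1,2,3]).insert 2 [4,5,6]).insert 3 [7,8,9]).insert 4 [10,11,12]
    files.filter (fun file =>
      pyGetKey file "year" == year && (quarter_months.getD quarter []).contains (pyGetKey file "month"))

-- ===== PORT B =====
-- groups.setdefault(k, []).append(file)  ≙  groups[k] = groups.get(k, []) + [file] (key inserted at end if absent)
def filter_files_by_quarter_alt (files : List (List (String × Int))) (year : Int) (quarter : Int) : List (List (String × Int)) :=
  if year == 0 || quarter == 0 then files
  else if !(([1, 2, 3, 4] : List Int).contains quarter) then []  -- raise ValueError: excluded by Pre_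
  else
    let groups : PySem.Dict Int (List (List (String × Int))) :=
      files.foldl (fun g file =>
        if pyGetKey file "year" == year then
          let k := PySem.Int.floordiv (pyGetKey file "month" - 1) 3 + 1
          g.insert k (g.getD k [] ++ [file])
        else g) PySem.Dict.empty
    groups.getD quarter []

-- ===== PRECONDITION & SPEC =====
-- Pre_ excludes exactly the inputs where A raises: ValueError when the quarter filter is requested with quarter ∉ {1,2,3,4},
-- and KeyError when a file lacks a "year" key, or matches the year but lacks a "month" key (the month lookup is
-- short-circuited when the year does not match). (With year == 0 or quarter == 0 A returns files unfiltered.)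
def Pre_filter_files_by_quarter (files : List (List (String × Int))) (year : Int) (quarter : Int) : Prop :=
  year = 0 ∨ quarter = 0 ∨
    (quarter ∈ ([1, 2, 3, 4] : List Int) ∧
     ∀ f ∈ files, (f.lookup "year").isSome ∧ (f.lookup "year" = some year → (f.lookup "month").isSome))
instance (files : List (List (String × Int))) (year : Int) (quarter : Int) : Decidable (Pre_filter_files_by_quarter files year quarter) := by unfold Pre_filter_files_by_quarter; infer_instance

def pvWitness_filter_files_by_quarter : (List (List (String × Int))) × Int × Int :=
  ([[("year", 2020), ("month", 2)], [("year", 2020), ("month", 7)]], 2020, 1)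

def Spec_filter_files_by_quarter (files : List (List (String × Int))) (year : Int) (quarter : Int) (out : List (List (String × Int))) : Prop := out = filter_files_by_quarter_alt files year quarter
instance (files : List (List (String × Int))) (year : Int) (quarter : Int) (out : List (List (String × Int))) : Decidable (Spec_filter_files_by_quarter files year quarter out) := by unfold Spec_filter_files_by_quarter; infer_instance

-- ===== CLAIM (what is proved, stated in full; the proofs are below) =====
def Claim_equal_filter_files_by_quarter : Prop := ∀ (files : List (List (String × Int))) (year : Int) (quarter : Int), Dom_filter_files_by_quarter files year quarter → Pre_filter_files_by_quarter files year quarter → Spec_filter_files_by_quarter files year quarter (filter_files_by_quarter files year quarter)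

-- ===== LEMMAS AND PROOFS =====

-- For each valid quarter q, month-list membership in A's table coincides with B's closed-form bucket key.
lemma month_table_eq_formula (q m : Int) (hq : q ∈ ([1, 2, 3, 4] : List Int)) :
    ((((((PySem.Dict.empty).insert 1 [1,2,3]).insert 2 [4,5,6]).insert 3 [7,8,9]).insert 4 [10,11,12] :
        PySem.Dict Int (List Int)).getD q []).contains m
      = (PySem.Int.floordiv (m - 1) 3 + 1 == q) := by
  rw [PySem.Int.floordiv_eq_ediv_of_pos (by norm_num : (0:Int) < 3)]
  fin_cases hq <;>
    · rw [Bool.eq_iff_iff]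
      simp [PySem.Dict.getD, PySem.Dict.get?, PySem.Dict.empty, PySem.Dict.insert]
      omega

-- Invariant of B's grouping pass: the bucket at q collects, in order, exactly the files whose year matches
-- and whose computed quarter key is q.
lemma groups_getD (year q : Int) (files : List (List (String × Int)))
    (d : PySem.Dict Int (List (List (String × Int)))) :
    (files.foldl (fun g file =>
        if pyGetKey file "year" == year then
          let k := PySem.Int.floordiv (pyGetKey file "month" - 1) 3 + 1
          g.insert k (g.getD k [] ++ [file])
        else g) d).getD q []
    = d.getD q [] ++ files.filter (fun file =>
        pyGetKey file "year" == year && (PySem.Int.floordiv (pyGetKey file "month" - 1) 3 + 1 == q)) := by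
  induction files generalizing d with
  | nil => simp
  | cons f rest ih =>
    simp only [List.foldl_cons, List.filter_cons]
    by_cases hy : (pyGetKey f "year" == year) = true
    · rw [if_pos hy, ih, PySem.Dict.getD_insert]
      simp only [hy, Bool.true_and]
      by_cases hk : PySem.Int.floordiv (pyGetKey f "month" - 1) 3 + 1 = q
      · subst hk
        rw [if_pos rfl, if_pos (beq_iff_eq.mpr rfl), List.append_assoc, List.singleton_append]
      · rw [if_neg (fun h => hk h.symm), if_neg (by rw [beq_iff_eq]; exact hk)]
    · rw [if_neg hy, ih]
      rw [Bool.not_eq_true] at hy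
      simp only [hy, Bool.false_and, if_neg (Bool.false_ne_true)]

-- ===== VERDICT (by name: the statement is the Claim_ definition above) =====
theorem filter_files_by_quarter_spec : Claim_equal_filter_files_by_quarter := by
  intro files year quarter _ hpre
  unfold Spec_filter_files_by_quarter filter_files_by_quarter filter_files_by_quarter_alt
  by_cases h0 : (year == 0 || quarter == 0) = true
  · simp [h0]
  · rw [if_neg h0, if_neg h0]
    have hq : quarter ∈ ([1, 2, 3, 4] : List Int) := by
      rcases hpre with h | h | h
      · simp [h] at h0
      · simp [h] at h0
      · exact h.1
    rw [if_neg (by simp [hq]), if_neg (by simp [hq])]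
    rw [groups_getD, PySem.Dict.getD_empty, List.nil_append]
    refine List.filter_congr ?_
    intro f _
    rw [month_table_eq_formula quarter (pyGetKey f "month") hq]
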